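-- pv_equiv track=rewrite | github.com/Cineg/Advent-of-Code | Day 11 - Cosmic Expansion/expansion.py | distance_vertical
-- ===== SOURCE A (Python) =====
-- VALUE = 1000000
--
-- def distance_vertical(
--     map: list[list[str]], column: int, row_start: int, row_end: int
-- ) -> int:
--     if row_end < row_start:
--         row_end, row_start = row_start, row_end
--
--     value: int = 0
--     for row in range(row_start, row_end):
--         if map[row][column] == "X":
--             value += VALUE
--         else:
--             value += 1
--
--     return value
-- ===== SOURCE B (Python) =====
-- VALUE = 1000000
--
-- def distance_vertical(
--     map: list[list[str]], column: int, row_start: int, row_end: int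
-- ) -> int:
--     lo, hi = (row_end, row_start) if row_end < row_start else (row_start, row_end)
--     count = sum(1 for r in range(lo, hi) if map[r][column] == "X")
--     return (hi - lo) + count * (VALUE - 1)
-- ===== Notes on version B (the rewrite author's own statement) =====
-- stated objective: simpler
-- what changed: Replaces the per-cell two-branch accumulator loop with a count of the X cells in the range plus the closed-form total (hi-lo) + count*(VALUE-1).
import Mathlib
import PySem

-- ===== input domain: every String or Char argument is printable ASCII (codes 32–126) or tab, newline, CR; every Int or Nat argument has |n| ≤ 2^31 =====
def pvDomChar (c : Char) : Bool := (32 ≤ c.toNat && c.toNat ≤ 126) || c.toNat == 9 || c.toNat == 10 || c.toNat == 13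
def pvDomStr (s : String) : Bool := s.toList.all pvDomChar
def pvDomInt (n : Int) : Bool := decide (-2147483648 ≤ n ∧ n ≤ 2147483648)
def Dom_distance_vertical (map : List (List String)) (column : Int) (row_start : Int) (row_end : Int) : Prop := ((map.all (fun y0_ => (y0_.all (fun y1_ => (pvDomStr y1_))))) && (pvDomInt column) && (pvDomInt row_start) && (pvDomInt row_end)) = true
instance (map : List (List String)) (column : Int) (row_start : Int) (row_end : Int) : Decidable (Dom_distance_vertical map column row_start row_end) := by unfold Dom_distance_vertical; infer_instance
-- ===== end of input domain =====

-- B replaces A's two-branch per-cell accumulator loop with a count of the "X" cells plus one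
-- closed-form expression (objective: simpler). Same return value on every input where A returns.

-- ===== PORT A =====
-- A's loop: for each row in range, add VALUE for an "X" cell else add 1 (pyGetD is exact under Pre_).
def distance_vertical (map : List (List String)) (column : Int) (row_start : Int) (row_end : Int) : Int :=
  let p := if row_end < row_start then (row_start, row_end) else (row_end, row_start)
  let row_end := p.1
  let row_start := p.2
  (PySem.List.pyRange row_start row_end 1).foldl
    (fun value row =>
      if PySem.List.pyGetD (PySem.List.pyGetD map row []) column "" == "X" then
        value + 1000000
      else
        value + 1) 0

-- ===== PORT B =====
def distance_vertical_alt (map : List (List String)) (column : Int) (row_start : Int) (row_end : Int) : Int :=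
  let lo := if row_end < row_start then row_end else row_start
  let hi := if row_end < row_start then row_start else row_end
  let count : Int :=
    ((PySem.List.pyRange lo hi 1).filter
      (fun r => PySem.List.pyGetD (PySem.List.pyGetD map r []) column "" == "X")).length
  (hi - lo) + count * (1000000 - 1)

-- ===== PRECONDITION & SPEC =====
-- Pre_ excludes exactly the inputs where A raises IndexError: some row of the iterated range
-- (or the column within that row) is out of Python index range.
def Pre_distance_vertical (map : List (List String)) (column : Int) (row_start : Int) (row_end : Int) : Prop :=
  max row_start row_end ≤ min row_start row_end ∨
    (-(map.length : Int) ≤ min row_start row_end ∧ max row_start row_end ≤ (map.length : Int) ∧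
      ∀ r ∈ PySem.List.pyRange (min row_start row_end) (max row_start row_end) 1,
        PySem.Raise.InRange (PySem.List.pyGetD map r []).length column)
instance (map : List (List String)) (column : Int) (row_start : Int) (row_end : Int) : Decidable (Pre_distance_vertical map column row_start row_end) := by unfold Pre_distance_vertical; infer_instance

def pvWitness_distance_vertical : List (List String) × Int × Int × Int := ([["X"], ["."]], 0, 0, 2)

def Spec_distance_vertical (map : List (List String)) (column : Int) (row_start : Int) (row_end : Int) (out : Int) : Prop := out = distance_vertical_alt map column row_start row_end
instance (map : List (List String)) (column : Int) (row_start : Int) (row_end : Int) (out : Int) : Decidable (Spec_distance_vertical map column row_start row_end out) := by unfold Spec_distance_vertical; infer_instance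

-- ===== CLAIM (what is proved, stated in full; the proofs are below) =====
def Claim_equal_distance_vertical : Prop := ∀ (map : List (List String)) (column : Int) (row_start : Int) (row_end : Int), Dom_distance_vertical map column row_start row_end → Pre_distance_vertical map column row_start row_end → Spec_distance_vertical map column row_start row_end (distance_vertical map column row_start row_end)

-- ===== LEMMAS AND PROOFS =====

-- A's accumulator loop in closed form: base + length + count·(V−1).
theorem foldl_ite_add_closed (p : Int → Bool) (V : Int) :
    ∀ (L : List Int) (acc : Int),
      L.foldl (fun value row => if p row then value + V else value + 1) acc
        = acc + L.length + (L.countP p : Int) * (V - 1) := by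
  intro L
  induction L with
  | nil => intro acc; simp
  | cons a t ih =>
    intro acc
    simp only [List.foldl_cons, List.countP_cons, ih]
    cases h : p a
    · simp only [h, Bool.false_eq_true, if_false]; push_cast [List.length_cons]; ring
    · simp only [h, if_true]; push_cast [List.length_cons]; ring

theorem distance_vertical_spec : Claim_equal_distance_vertical := by
  intro map column row_start row_end _ _
  unfold Spec_distance_vertical distance_vertical distance_vertical_alt
  by_cases h : row_end < row_start <;>
    simp only [h, if_true, if_false] <;>
    rw [foldl_ite_add_closed] <;>
    rw [List.countP_eq_length_filter] <;>
    simp [PySem.List.length_pyRange_one] <;>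
    omega

-- ===== VERDICT (by name: the statement is the Claim_ definition above) =====
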